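-- pv_equiv track=rewrite | github.com/eliottcassidy2000/math | 04-computation/h21_moon_bound.py | gen_no_source_sink_scores
-- ===== SOURCE A (Python) =====
-- from math import comb
--
-- def gen_no_source_sink_scores(n):
--     """Generate valid tournament score sequences with no source/sink."""
--     target = n * (n-1) // 2
--
--     def backtrack(idx, rem, prev, seq):
--         if idx == n:
--             if rem == 0:
--                 yield tuple(seq)
--             return
--         lo = max(prev, 1)  # min score = 1 (no source)
--         hi = n - 2  # max score = n-2 (no sink)
--         for s in range(lo, hi + 1):
--             if rem - s < 0:
--                 break
--             # Check remaining can fill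
--             remaining = n - idx - 1
--             if remaining > 0:
--                 max_remain = remaining * hi
--                 min_remain = remaining * max(s, 1)
--                 if rem - s > max_remain or rem - s < min_remain:
--                     continue
--
--             new_seq = seq + [s]
--             # Landau check for partial sum
--             k = len(new_seq)
--             if sum(new_seq) < comb(k, 2):
--                 continue
--
--             yield from backtrack(idx + 1, rem - s, s, new_seq)
--
--     yield from backtrack(0, target, 1, [])
-- ===== SOURCE B (Python) =====
-- from math import comb
-- from itertools import combinations_with_replacement, accumulate
--
--
-- def gen_no_source_sink_scores(n):
--     """Generate valid tournament score sequences with no source/sink."""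
--     if n < 0:  # no score sequences of negative length
--         return
--     target = n * (n - 1) // 2
--     landau = [comb(k, 2) for k in range(1, n + 1)]
--     for cand in combinations_with_replacement(range(1, n - 1), n):
--         if sum(cand) == target and all(
--             p >= b for p, b in zip(accumulate(cand), landau)
--         ):
--             yield cand
-- ===== Notes on version B (the rewrite author's own statement) =====
-- stated objective: simpler
-- what changed: Replaces the pruned stateful backtracking (running remainder, bound pruning, inline Landau checks) by flat generate-and-filter: enumerate every nondecreasing n-tuple over [1,n-2] in lexicographic order and keep those whose total is n*(n-1)//2 and whose every prefix sum meets the Landau bound comb(k,2).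
import Mathlib
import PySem

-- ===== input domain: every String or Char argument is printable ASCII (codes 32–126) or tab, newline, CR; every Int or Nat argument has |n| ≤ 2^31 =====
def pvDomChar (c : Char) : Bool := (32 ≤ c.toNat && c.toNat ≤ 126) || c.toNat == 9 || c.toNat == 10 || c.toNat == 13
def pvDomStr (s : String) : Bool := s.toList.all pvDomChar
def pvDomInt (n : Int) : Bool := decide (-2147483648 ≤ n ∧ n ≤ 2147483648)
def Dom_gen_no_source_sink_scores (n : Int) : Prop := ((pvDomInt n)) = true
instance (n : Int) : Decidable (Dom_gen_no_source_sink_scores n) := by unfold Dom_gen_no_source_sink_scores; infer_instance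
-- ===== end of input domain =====

-- B replaces A's pruned recursive backtracking by flat enumerate-then-filter over all
-- nondecreasing tuples (combinations_with_replacement); same output list, not claimed faster.


-- ===== PORT A =====
-- inner 'for s in range(lo, hi + 1)' loop of backtrack: break / continue / yield-from, rest of loop

def pvLoopA (n idx rem : Int) (seq : List Int)
    (bt : Int → Int → Int → List Int → List (List Int)) : List Int → List (List Int)
  | [] => []
  | s :: rest =>
    if rem - s < 0 then []          -- break
    else if n - idx - 1 > 0 ∧
        (rem - s > (n - idx - 1) * (n - 2) ∨ rem - s < (n - idx - 1) * (max s 1)) then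
      pvLoopA n idx rem seq bt rest -- continue (remaining cannot reach rem - s)
    else if (seq ++ [s]).sum < (Nat.choose (seq ++ [s]).length 2 : Int) then
      pvLoopA n idx rem seq bt rest -- continue (Landau check fails)
    else
      bt (idx + 1) (rem - s) s (seq ++ [s]) ++ pvLoopA n idx rem seq bt rest

def pvBtA : Nat → Int → Int → Int → Int → List Int → List (List Int)
  | 0, n, idx, rem, _prev, seq => if idx = n then (if rem = 0 then [seq] else []) else []
  | fuel + 1, n, idx, rem, prev, seq =>
    if idx = n then (if rem = 0 then [seq] else [])
    else pvLoopA n idx rem seq (pvBtA fuel n) (PySem.List.pyRange (max prev 1) ((n - 2) + 1) 1)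

def gen_no_source_sink_scores (n : Int) : List (List Int) :=
  pvBtA n.toNat n 0 (PySem.Int.floordiv (n * (n - 1)) 2) 1 []

-- ===== PORT B =====
-- itertools.combinations_with_replacement(pool, r) in its lexicographic emission order
def pvCWR : List Int → Nat → List (List Int)
  | _, 0 => [[]]
  | [], _ + 1 => []
  | x :: xs, r + 1 => (pvCWR (x :: xs) r).map (fun t => x :: t) ++ pvCWR xs (r + 1)
  termination_by pool r => (r, pool.length)

-- all(p >= b for p, b in zip(accumulate(cand), landau))  (zip stops at the shorter list)
def pvCk2 : List Int → Int → List Int → Bool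
  | [], _, _ => true
  | _ :: _, _, [] => true
  | x :: xs, acc, b :: bs => decide (b ≤ acc + x) && pvCk2 xs (acc + x) bs

def gen_no_source_sink_scores_alt (n : Int) : List (List Int) :=
  if n < 0 then []  -- no score sequences of negative length
  else
    (pvCWR (PySem.List.pyRange 1 (n - 1) 1) n.toNat).filter
      (fun c => decide (c.sum = PySem.Int.floordiv (n * (n - 1)) 2) &&
        pvCk2 c 0 ((PySem.List.pyRange 1 (n + 1) 1).map (fun k => (Nat.choose k.toNat 2 : Int))))

-- ===== PRECONDITION & SPEC =====
-- Pre_ excludes n above CPython's default recursion limit: A's backtracking recurses n deep,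
-- so on those inputs it can only end in a RecursionError (B does not finish there either).
def Pre_gen_no_source_sink_scores (n : Int) : Prop := n ≤ 996
instance (n : Int) : Decidable (Pre_gen_no_source_sink_scores n) := by unfold Pre_gen_no_source_sink_scores; infer_instance
def pvWitness_gen_no_source_sink_scores : Int := 6

def Spec_gen_no_source_sink_scores (n : Int) (out : List (List Int)) : Prop := out = gen_no_source_sink_scores_alt n
instance (n : Int) (out : List (List Int)) : Decidable (Spec_gen_no_source_sink_scores n out) := by unfold Spec_gen_no_source_sink_scores; infer_instance

-- ===== CLAIM (what is proved, stated in full; the proofs are below) =====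
def Claim_equal_gen_no_source_sink_scores : Prop := ∀ (n : Int), Dom_gen_no_source_sink_scores n → Pre_gen_no_source_sink_scores n → Spec_gen_no_source_sink_scores n (gen_no_source_sink_scores n)

-- ===== LEMMAS AND PROOFS =====

-- proof-only: the Landau prefix predicate carried through the A-side induction
def pvCk : List Int → Int → Nat → Bool
  | [], _, _ => true
  | x :: xs, acc, k => decide ((Nat.choose k 2 : Int) ≤ acc + x) && pvCk xs (acc + x) (k + 1)

theorem mem_pvCWR : ∀ (r : Nat) (pool c : List Int), c ∈ pvCWR pool r →
    c.length = r ∧ ∀ x ∈ c, x ∈ pool := by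
  intro r
  induction r with
  | zero => intro pool c h; simp only [pvCWR, List.mem_singleton] at h; subst h; simp
  | succ r ih =>
    intro pool
    induction pool with
    | nil => intro c h; simp [pvCWR] at h
    | cons x xs ihp =>
      intro c h
      rw [pvCWR] at h
      rcases List.mem_append.1 h with h1 | h2
      · obtain ⟨t, ht, rfl⟩ := List.mem_map.1 h1
        obtain ⟨hl, hm⟩ := ih (x :: xs) t ht
        refine ⟨by simp [hl], ?_⟩
        intro y hy
        rcases List.mem_cons.1 hy with rfl | hy
        · exact List.mem_cons_self
        · exact hm y hy
      · obtain ⟨hl, hm⟩ := ihp c h2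
        exact ⟨hl, fun y hy => List.mem_cons_of_mem _ (hm y hy)⟩

theorem sum_ge_of_forall_ge : ∀ (c : List Int) (lo : Int), (∀ x ∈ c, lo ≤ x) →
    (c.length : Int) * lo ≤ c.sum := by
  intro c lo h
  induction c with
  | nil => simp
  | cons x xs ih =>
    have hx := h x (List.mem_cons_self)
    have := ih (fun y hy => h y (List.mem_cons_of_mem _ hy))
    simp only [List.sum_cons, List.length_cons]
    push_cast
    nlinarith

theorem sum_le_of_forall_le : ∀ (c : List Int) (hi : Int), (∀ x ∈ c, x ≤ hi) →
    c.sum ≤ (c.length : Int) * hi := by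
  intro c hi h
  induction c with
  | nil => simp
  | cons x xs ih =>
    have hx := h x (List.mem_cons_self)
    have := ih (fun y hy => h y (List.mem_cons_of_mem _ hy))
    simp only [List.sum_cons, List.length_cons]
    push_cast
    nlinarith

theorem loopA_eq (fuel : Nat) (n : Int)
    (IH : ∀ (idx rem prev : Int) (seq : List Int), (fuel : Int) = n - idx →
      pvBtA fuel n idx rem prev seq =
        ((pvCWR (PySem.List.pyRange (max prev 1) (n - 1) 1) fuel).filter
          (fun c => decide (c.sum = rem) && pvCk c seq.sum (seq.length + 1))).map
            (fun c => seq ++ c)) :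
    ∀ (m : Nat) (s0 idx rem : Int) (seq : List Int),
      (n - 1 - s0).toNat ≤ m → (fuel : Int) + 1 = n - idx → 1 ≤ s0 →
      pvLoopA n idx rem seq (pvBtA fuel n) (PySem.List.pyRange s0 (n - 1) 1) =
        ((pvCWR (PySem.List.pyRange s0 (n - 1) 1) (fuel + 1)).filter
          (fun c => decide (c.sum = rem) && pvCk c seq.sum (seq.length + 1))).map
            (fun c => seq ++ c) := by
  intro m
  induction m with
  | zero =>
    intro s0 idx rem seq hm hidx hs0
    rw [PySem.List.pyRange_one_eq_nil (by omega)]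
    simp [pvLoopA, pvCWR]
  | succ m ihm =>
    intro s0 idx rem seq hm hidx hs0
    by_cases hb : n - 1 ≤ s0
    · rw [PySem.List.pyRange_one_eq_nil hb]
      simp [pvLoopA, pvCWR]
    · rw [not_le] at hb
      have hmax : max s0 1 = s0 := max_eq_left hs0
      have hcons := PySem.List.pyRange_one_cons hb
      rw [hcons, pvCWR, pvLoopA]
      have hrem : n - idx - 1 = (fuel : Int) := by omega
      rw [hrem, hmax]
      have htail := ihm (s0 + 1) idx rem seq (by omega) hidx (by omega)
      have hfull : ∀ t ∈ pvCWR (s0 :: PySem.List.pyRange (s0 + 1) (n - 1) 1) fuel,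
          t.length = fuel ∧ ∀ x ∈ t, s0 ≤ x ∧ x ≤ n - 2 := by
        intro t ht
        obtain ⟨hl, hmem⟩ := mem_pvCWR _ _ _ ht
        refine ⟨hl, fun x hx => ?_⟩
        rcases List.mem_cons.1 (hmem x hx) with rfl | hx'
        · omega
        · have := (PySem.List.mem_pyRange_one).1 hx'
          omega
      have hLr : ∀ c ∈ pvCWR (PySem.List.pyRange (s0 + 1) (n - 1) 1) (fuel + 1),
          c.length = fuel + 1 ∧ ∀ x ∈ c, s0 + 1 ≤ x ∧ x < n - 1 := by
        intro c hc
        obtain ⟨hl, hmem⟩ := mem_pvCWR _ _ _ hc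
        refine ⟨hl, fun x hx => ?_⟩
        have := (PySem.List.mem_pyRange_one).1 (hmem x hx)
        omega
      rw [List.filter_append, List.map_append]
      by_cases h1 : rem - s0 < 0
      · rw [if_pos h1]
        have e1 : ((pvCWR (s0 :: PySem.List.pyRange (s0 + 1) (n - 1) 1) fuel).map
            (fun t => s0 :: t)).filter
            (fun c => decide (c.sum = rem) && pvCk c seq.sum (seq.length + 1)) = [] := by
          rw [List.filter_eq_nil_iff]
          intro c hc
          obtain ⟨t, ht, rfl⟩ := List.mem_map.1 hc
          obtain ⟨hl, hmem⟩ := hfull t ht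
          have h0 : (0:Int) ≤ t.sum := by
            have := sum_ge_of_forall_ge t 0 (fun x hx => by have := (hmem x hx).1; omega)
            simpa using this
          simp only [List.sum_cons, Bool.and_eq_true, decide_eq_true_eq, not_and]
          intro he
          omega
        have e2 : (pvCWR (PySem.List.pyRange (s0 + 1) (n - 1) 1) (fuel + 1)).filter
            (fun c => decide (c.sum = rem) && pvCk c seq.sum (seq.length + 1)) = [] := by
          rw [List.filter_eq_nil_iff]
          intro c hc
          obtain ⟨hl, hmem⟩ := hLr c hc
          have hge := sum_ge_of_forall_ge c (s0 + 1) (fun x hx => (hmem x hx).1)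
          rw [hl] at hge
          simp only [Bool.and_eq_true, decide_eq_true_eq, not_and]
          intro he
          exfalso
          rw [he] at hge
          push_cast at hge
          nlinarith [Int.natCast_nonneg fuel]
        rw [e1, e2]
        simp
      · rw [if_neg h1]
        by_cases h2 : (fuel : Int) > 0 ∧
            (rem - s0 > (fuel : Int) * (n - 2) ∨ rem - s0 < (fuel : Int) * s0)
        · rw [if_pos h2, htail]
          have e1 : ((pvCWR (s0 :: PySem.List.pyRange (s0 + 1) (n - 1) 1) fuel).map
              (fun t => s0 :: t)).filter
              (fun c => decide (c.sum = rem) && pvCk c seq.sum (seq.length + 1)) = [] := by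
            rw [List.filter_eq_nil_iff]
            intro c hc
            obtain ⟨t, ht, rfl⟩ := List.mem_map.1 hc
            obtain ⟨hl, hmem⟩ := hfull t ht
            have hge := sum_ge_of_forall_ge t s0 (fun x hx => (hmem x hx).1)
            have hle := sum_le_of_forall_le t (n - 2) (fun x hx => (hmem x hx).2)
            rw [hl] at hge hle
            simp only [List.sum_cons, Bool.and_eq_true, decide_eq_true_eq, not_and]
            intro he
            exfalso
            rcases h2.2 with h | h <;> omega
          rw [e1]
          simp
        · rw [if_neg h2]
          by_cases h3 : (seq ++ [s0]).sum < (Nat.choose (seq ++ [s0]).length 2 : Int)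
          · rw [if_pos h3, htail]
            have e1 : ((pvCWR (s0 :: PySem.List.pyRange (s0 + 1) (n - 1) 1) fuel).map
                (fun t => s0 :: t)).filter
                (fun c => decide (c.sum = rem) && pvCk c seq.sum (seq.length + 1)) = [] := by
              rw [List.filter_eq_nil_iff]
              intro c hc
              obtain ⟨t, ht, rfl⟩ := List.mem_map.1 hc
              simp only [List.sum_append, List.sum_cons, List.sum_nil, add_zero, zero_add,
                List.length_append, List.length_cons, List.length_nil] at h3
              simp only [pvCk, List.sum_cons, Bool.and_eq_true, decide_eq_true_eq, not_and]
              intro _ h4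
              exact absurd h4 (by omega)
            rw [e1]
            simp
          · rw [if_neg h3]
            rw [IH (idx + 1) (rem - s0) s0 (seq ++ [s0]) (by omega)]
            rw [hmax, hcons, htail]
            congr 1
            rw [List.filter_map, List.map_map]
            have hpt : ∀ t ∈ pvCWR (s0 :: PySem.List.pyRange (s0 + 1) (n - 1) 1) fuel,
                ((fun c => decide (c.sum = rem) && pvCk c seq.sum (seq.length + 1)) ∘
                  (fun t => s0 :: t)) t =
                (fun c => decide (c.sum = (rem - s0)) &&
                  pvCk c (seq ++ [s0]).sum ((seq ++ [s0]).length + 1)) t := by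
              intro t _
              simp only [List.sum_append, List.sum_cons, List.sum_nil, add_zero, zero_add,
                List.length_append, List.length_cons, List.length_nil] at h3 ⊢
              simp only [Function.comp_apply, pvCk, List.sum_cons]
              have hok : (Nat.choose (seq.length + 1) 2 : Int) ≤ seq.sum + s0 := by omega
              simp only [eq_true hok, decide_true, Bool.true_and]
              congr 1
              simp only [decide_eq_decide]
              omega
            rw [List.filter_congr hpt]
            apply List.map_congr_left
            intro t _
            simp

-- backtrack(idx, rem, prev, seq) equals filtering all candidates with first slot ≥ max prev 1
theorem btA_eq : ∀ (fuel : Nat) (n idx rem prev : Int) (seq : List Int),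
    (fuel : Int) = n - idx →
    pvBtA fuel n idx rem prev seq =
      ((pvCWR (PySem.List.pyRange (max prev 1) (n - 1) 1) fuel).filter
        (fun c => decide (c.sum = rem) && pvCk c seq.sum (seq.length + 1))).map
          (fun c => seq ++ c) := by
  intro fuel
  induction fuel with
  | zero =>
    intro n idx rem prev seq h
    have hidx : idx = n := by omega
    subst hidx
    by_cases hr : rem = 0
    · subst hr; simp [pvBtA, pvCWR, pvCk]
    · simp [pvBtA, pvCWR, pvCk, hr, Ne.symm hr]
  | succ fuel ih =>
    intro n idx rem prev seq h
    have hne : idx ≠ n := by omega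
    rw [pvBtA, if_neg hne, show ((n : Int) - 2) + 1 = n - 1 by ring]
    exact loopA_eq fuel n (fun i r p s hh => ih n i r p s hh)
      ((n - 1 - max prev 1).toNat) (max prev 1) idx rem seq le_rfl (by omega)
      (le_max_right _ _)

-- backtrack(idx, rem, prev, seq) equals filtering all candidates with first slot ≥ max prev 1
theorem ck2_eq (n : Int) : ∀ (c : List Int) (acc : Int) (k : Nat), 1 ≤ k →
    (k : Int) + c.length ≤ n + 1 →
    pvCk2 c acc ((PySem.List.pyRange (k : Int) (n + 1) 1).map
      (fun j => (Nat.choose j.toNat 2 : Int))) = pvCk c acc k := by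
  intro c
  induction c with
  | nil => intro acc k _ _; simp [pvCk2, pvCk]
  | cons x xs ih =>
    intro acc k hk hle
    rw [PySem.List.pyRange_one_cons (by simp at hle; omega), List.map_cons]
    rw [pvCk2, pvCk]
    have h1 : ((k : Int)).toNat = k := Int.toNat_natCast k
    have h2 : ((k : Int) + 1) = ((k + 1 : Nat) : Int) := by push_cast; ring
    rw [h1, h2, ih (acc + x) (k + 1) (by omega) (by simp at hle ⊢; omega)]

-- ===== VERDICT (by name: the statement is the Claim_ definition above) =====
theorem gen_no_source_sink_scores_spec : Claim_equal_gen_no_source_sink_scores := by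
  intro n _hdom _hpre
  unfold Spec_gen_no_source_sink_scores gen_no_source_sink_scores gen_no_source_sink_scores_alt
  by_cases hn : n < 0
  · rw [if_pos hn]
    have h0 : n.toNat = 0 := by omega
    rw [h0, pvBtA, if_neg (by omega : ¬ (0 : Int) = n)]
  · rw [if_neg hn]
    have h := btA_eq n.toNat n 0 (PySem.Int.floordiv (n * (n - 1)) 2) 1 []
      (by simp [Int.toNat_of_nonneg (by omega : (0:Int) ≤ n)])
    rw [h]
    simp only [List.nil_append, List.map_id_fun', List.length_nil, List.sum_nil, id]
    refine (List.filter_congr ?_).symm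
    intro c hc
    obtain ⟨hl, -⟩ := mem_pvCWR _ _ _ hc
    have := ck2_eq n c 0 1 le_rfl
      (by rw [hl]; push_cast; omega)
    simp only [Nat.cast_one] at this
    rw [this]
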